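-- pv_equiv track=rewrite | github.com/atalanuhser/ai-interview-simulator- | app/ai/interview_engine.py | get_chat_history
-- ===== SOURCE A (Python) =====
-- def get_chat_history(history: list) -> list:
--     qa_list = []
--     messages = [m for m in history if m["role"] != "system"]
--     for i in range(0, len(messages) - 1, 2):
--         if i + 1 < len(messages):
--             qa_list.append({
--                 "question": messages[i]["content"],
--                 "answer": messages[i + 1]["content"]
--             })
--     return qa_list
-- ===== SOURCE B (Python) =====
-- def get_chat_history(history: list) -> list:
--     # Single streaming pass: buffer a pending question message, emit a pair
--     # when its answer arrives; a trailing unpaired message is dropped.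
--     qa_list = []
--     pending = None
--     for m in history:
--         if m["role"] == "system":
--             continue
--         if pending is None:
--             pending = m
--         else:
--             qa_list.append({
--                 "question": pending["content"],
--                 "answer": m["content"]
--             })
--             pending = None
--     return qa_list
-- ===== Notes on version B (the rewrite author's own statement) =====
-- stated objective: simpler
-- what changed: Replaces the build-a-filtered-list-then-index-by-twos loop with a single streaming pass over history that buffers one pending question message and emits a pair when its answer arrives.
import Mathlib
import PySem

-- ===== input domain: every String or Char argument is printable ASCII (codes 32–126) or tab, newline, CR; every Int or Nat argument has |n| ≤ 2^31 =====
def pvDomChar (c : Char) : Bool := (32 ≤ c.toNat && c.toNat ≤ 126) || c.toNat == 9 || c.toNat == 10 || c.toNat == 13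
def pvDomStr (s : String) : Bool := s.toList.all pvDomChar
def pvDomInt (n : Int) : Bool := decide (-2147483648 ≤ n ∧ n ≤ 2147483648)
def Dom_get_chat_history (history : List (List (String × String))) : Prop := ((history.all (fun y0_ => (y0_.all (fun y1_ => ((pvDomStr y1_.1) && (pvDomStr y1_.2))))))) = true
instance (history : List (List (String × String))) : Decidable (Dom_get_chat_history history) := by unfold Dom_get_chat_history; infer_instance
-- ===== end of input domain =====

-- B does one streaming pass with a pending buffer instead of A's filtered list indexed by twos; same values, structurally different (objective: simpler).

-- shared dict accessors (m["role"] / m["content"], exact inside Pre_ where the keys exist)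
def pvRole (m : List (String × String)) : String := (PySem.Dict.ofList m).getD "role" ""
def pvContent (m : List (String × String)) : String := (PySem.Dict.ofList m).getD "content" ""

-- ===== PORT A =====
def get_chat_history (history : List (List (String × String))) : List (List (String × String)) :=
  let messages := history.filter (fun m => pvRole m != "system")
  (PySem.List.pyRange 0 ((messages.length : Int) - 1) 2).foldl
    (fun qa_list i =>
      if i + 1 < (messages.length : Int) then
        qa_list ++ [[("question", pvContent (PySem.List.pyGetD messages i [])),
                     ("answer", pvContent (PySem.List.pyGetD messages (i + 1) []))]]
      else qa_list) []

-- ===== PORT B =====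
def get_chat_history_alt (history : List (List (String × String))) : List (List (String × String)) :=
  (history.foldl
    (fun (st : List (List (String × String)) × Option (List (String × String))) m =>
      if pvRole m == "system" then st
      else
        match st.2 with
        | none => (st.1, some m)
        | some p => (st.1 ++ [[("question", pvContent p), ("answer", pvContent m)]], none))
    ([], none)).1

-- ===== PRECONDITION & SPEC =====
-- Pre_ excludes exactly the inputs on which the Python raises KeyError: a message
-- without a "role" key, or a non-system message that gets paired but has no "content" key.
def Pre_get_chat_history (history : List (List (String × String))) : Prop :=
  (∀ m ∈ history, (PySem.Dict.ofList m).contains "role" = true) ∧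
  (∀ m ∈ (history.filter (fun m => pvRole m != "system")).take
        (2 * ((history.filter (fun m => pvRole m != "system")).length / 2)),
      (PySem.Dict.ofList m).contains "content" = true)
instance (history : List (List (String × String))) : Decidable (Pre_get_chat_history history) := by
  unfold Pre_get_chat_history; infer_instance
def pvWitness_get_chat_history : (List (List (String × String))) :=
  [[("role", "user"), ("content", "Hi")], [("role", "assistant"), ("content", "Hello")]]
def Spec_get_chat_history (history : List (List (String × String))) (out : List (List (String × String))) : Prop := out = get_chat_history_alt history
instance (history : List (List (String × String))) (out : List (List (String × String))) : Decidable (Spec_get_chat_history history out) := by unfold Spec_get_chat_history; infer_instance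

-- ===== CLAIM (what is proved, stated in full; the proofs are below) =====
def Claim_equal_get_chat_history : Prop := ∀ (history : List (List (String × String))), Dom_get_chat_history history → Pre_get_chat_history history → Spec_get_chat_history history (get_chat_history history)

-- ===== LEMMAS AND PROOFS =====

-- pairing of an already-filtered message list, two at a time
def pvPairUp : List (List (String × String)) → List (List (String × String))
  | x :: y :: rest => [("question", pvContent x), ("answer", pvContent y)] :: pvPairUp rest
  | _ => []

-- pairing when one question is already buffered
def pvConsPair (p : List (String × String)) : List (List (String × String)) → List (List (String × String))
  | [] => []
  | m :: rest => [("question", pvContent p), ("answer", pvContent m)] :: pvPairUp rest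

lemma pvPairUp_cons (m : List (String × String)) (ms : List (List (String × String))) :
    pvPairUp (m :: ms) = pvConsPair m ms := by
  cases ms <;> rfl

lemma pyRange_two_cons (b : Int) (h : 0 < b) :
    PySem.List.pyRange 0 b 2 = 0 :: (PySem.List.pyRange 0 (b - 2) 2).map (· + 2) := by
  rw [PySem.List.pyRange_of_pos 0 b (by norm_num), PySem.List.pyRange_of_pos 0 (b-2) (by norm_num)]
  have hc : (if (0:Int) < b then ((b - 0 + 2 - 1) / 2).toNat else 0)
      = (if (0:Int) < b - 2 then ((b - 2 - 0 + 2 - 1) / 2).toNat else 0) + 1 := by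
    split_ifs <;> omega
  rw [hc, List.range_succ_eq_map, List.map_cons, List.map_map, List.map_map]
  simp [Function.comp]
  intro a _
  ring

lemma pyRange_two_nil (b : Int) (h : b ≤ 0) : PySem.List.pyRange 0 b 2 = [] := by
  rw [PySem.List.pyRange_of_pos 0 b (by norm_num)]
  have : ¬ ((0:Int) < b) := by omega
  simp [this]

lemma map_range_pairs (ms : List (List (String × String))) :
    (PySem.List.pyRange 0 ((ms.length : Int) - 1) 2).map
      (fun i => [("question", pvContent (PySem.List.pyGetD ms i [])),
                 ("answer", pvContent (PySem.List.pyGetD ms (i + 1) []))]) = pvPairUp ms := by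
  match ms with
  | [] => rw [pyRange_two_nil _ (by simp)]; rfl
  | [x] => rw [pyRange_two_nil _ (by simp)]; rfl
  | x :: y :: rest =>
    have ih := map_range_pairs rest
    have hb : (0:Int) < ((x :: y :: rest).length : Int) - 1 := by simp
    rw [pyRange_two_cons _ hb, List.map_cons, List.map_map]
    have hshift : ((((x :: y :: rest).length : Int) - 1) - 2) = ((rest.length : Int) - 1) := by
      simp; omega
    rw [hshift]
    show _ :: _ = _ :: _
    congr 1
    · norm_num [PySem.List.pyGetD_ofNat']
    · rw [← ih]
      refine List.map_congr_left (fun i hi => ?_)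
      have h0 : 0 ≤ i := ((PySem.List.mem_pyRange_iff_of_pos (by norm_num) i).1 hi).1
      simp [Function.comp]
      rw [PySem.List.pyGetD_of_nonneg _ _ (by omega), PySem.List.pyGetD_of_nonneg _ _ (by omega),
          PySem.List.pyGetD_of_nonneg _ _ (by omega), PySem.List.pyGetD_of_nonneg _ _ (by omega)]
      have h2 : (i + 2).toNat = i.toNat + 2 := by omega
      have h3 : (i + 2 + 1).toNat = (i+1).toNat + 2 := by omega
      simp [h2, h3]
termination_by ms.length

lemma loopA_eq (ms : List (List (String × String))) :
    (PySem.List.pyRange 0 ((ms.length : Int) - 1) 2).foldl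
      (fun qa_list i =>
        if i + 1 < (ms.length : Int) then
          qa_list ++ [[("question", pvContent (PySem.List.pyGetD ms i [])),
                       ("answer", pvContent (PySem.List.pyGetD ms (i + 1) []))]]
        else qa_list) [] = pvPairUp ms := by
  rw [PySem.List.foldl_append_ite (fun i => i + 1 < (ms.length : Int))
      (fun i => [("question", pvContent (PySem.List.pyGetD ms i [])),
                 ("answer", pvContent (PySem.List.pyGetD ms (i + 1) []))])]
  rw [List.filter_eq_self.mpr ?hall]
  case hall =>
    intro i hi
    have h := (PySem.List.mem_pyRange_iff_of_pos (by norm_num) i).1 hi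
    simp only [decide_eq_true_eq]
    omega
  rw [List.nil_append]
  exact map_range_pairs ms

lemma A_eq_pairUp (history : List (List (String × String))) :
    get_chat_history history = pvPairUp (history.filter (fun m => pvRole m != "system")) := by
  unfold get_chat_history
  exact loopA_eq _

lemma B_inv (hist : List (List (String × String)))
    (acc : List (List (String × String))) (pending : Option (List (String × String))) :
    (hist.foldl
      (fun (st : List (List (String × String)) × Option (List (String × String))) m =>
        if pvRole m == "system" then st
        else
          match st.2 with
          | none => (st.1, some m)
          | some p => (st.1 ++ [[("question", pvContent p), ("answer", pvContent m)]], none))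
      (acc, pending)).1
    = acc ++ (match pending with
        | none => pvPairUp (hist.filter (fun m => pvRole m != "system"))
        | some p => pvConsPair p (hist.filter (fun m => pvRole m != "system"))) := by
  induction hist generalizing acc pending with
  | nil => cases pending <;> simp [pvConsPair, pvPairUp]
  | cons m rest ih =>
    simp only [List.foldl_cons, List.filter_cons]
    by_cases hs : (pvRole m == "system") = true
    · rw [if_pos hs]
      have hne : (pvRole m != "system") = false := by
        simp only [bne, hs, Bool.not_true]
      rw [hne]
      rw [if_neg (by simp)]
      exact ih acc pending
    · rw [if_neg hs]
      have hne : (pvRole m != "system") = true := by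
        simp only [bne, Bool.not_eq_true'] at *
        simp [hs]
      rw [hne, if_pos rfl]
      cases pending with
      | none =>
        rw [show (match ((acc, (none : Option (List (String × String)))) :
              List (List (String × String)) × Option (List (String × String))).2 with
            | none => (acc, some m)
            | some p => (acc ++ [[("question", pvContent p), ("answer", pvContent m)]], none))
            = (acc, some m) from rfl]
        rw [ih acc (some m), pvPairUp_cons]
      | some p =>
        rw [show (match ((acc, (some p : Option (List (String × String)))) :
              List (List (String × String)) × Option (List (String × String))).2 with
            | none => (acc, some m)
            | some p => (acc ++ [[("question", pvContent p), ("answer", pvContent m)]], none))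
            = (acc ++ [[("question", pvContent p), ("answer", pvContent m)]], none) from rfl]
        rw [ih _ none]
        simp [pvConsPair]

-- ===== VERDICT (by name: the statement is the Claim_ definition above) =====
theorem get_chat_history_spec : Claim_equal_get_chat_history := by
  intro history _ _
  unfold Spec_get_chat_history get_chat_history_alt
  rw [A_eq_pairUp, B_inv]
  simp
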